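-- pv_equiv track=rewrite | github.com/Zayitskin/aoc2020 | day 04/main.py | convertToPassport
-- ===== SOURCE A (Python) =====
-- def convertToPassport(data: list) -> list:
--     """Convert the input into a list of passport dicts."""
--     passports: list = []
--     currentPassport: dict = {}
--     for line in data:
--         if line == "":
--             passports.append(currentPassport)
--             currentPassport = {}
--         else:
--             for bit in line.split(" "):
--                 key, value = bit.split(":")
--                 currentPassport[key] = value
--
--     passports.append(currentPassport)
--
--     return passports
-- ===== SOURCE B (Python) =====
-- def parseGroup(lines: list) -> dict:
--     """Build one passport dict from the non-blank lines of a group."""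
--     passport: dict = {}
--     for key, value in [tok.split(":") for line in lines for tok in line.split(" ")]:
--         passport[key] = value
--     return passport
--
--
-- def convertToPassport(data: list) -> list:
--     """Convert the input into a list of passport dicts."""
--     passports: list = []
--     rest = data
--     while "" in rest:
--         i = rest.index("")
--         passports.append(parseGroup(rest[:i]))
--         rest = rest[i + 1:]
--     passports.append(parseGroup(rest))
--     return passports
-- ===== Notes on version B (the rewrite author's own statement) =====
-- stated objective: alternative
-- what changed: Replaces A's single pass with interleaved flush/accumulate dict state by blank-line-driven slicing: repeatedly locate the next blank with index, slice the group off, and build each passport dict from a flattened token list in a separate helper.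
import Mathlib
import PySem

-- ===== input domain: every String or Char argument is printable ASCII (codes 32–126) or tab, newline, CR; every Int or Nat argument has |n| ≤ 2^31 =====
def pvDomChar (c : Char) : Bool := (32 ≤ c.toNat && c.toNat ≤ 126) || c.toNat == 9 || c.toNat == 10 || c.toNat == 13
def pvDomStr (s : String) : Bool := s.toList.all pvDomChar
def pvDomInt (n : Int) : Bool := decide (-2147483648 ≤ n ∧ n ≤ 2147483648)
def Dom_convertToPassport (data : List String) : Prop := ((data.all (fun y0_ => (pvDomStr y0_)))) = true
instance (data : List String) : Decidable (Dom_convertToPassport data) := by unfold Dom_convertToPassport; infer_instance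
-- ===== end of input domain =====

-- B replaces A's one-pass flush/accumulate dict loop by blank-line-driven slicing (index + slices,
-- per-group helper over a flattened token list); objective: alternative.

-- ===== PORT A =====
-- inner 'for bit in line.split(" "): key, value = bit.split(":"); currentPassport[key] = value'
-- (a token whose split(":") is not a pair makes Python raise ValueError; Pre_ excludes those inputs, the port skips the token there)
def cpAddLineA (d : PySem.Dict String String) (line : String) : PySem.Dict String String :=
  ((PySem.Str.split? line " ").getD []).foldl
    (fun d bit =>
      match PySem.Str.split? bit ":" with
      | some [k, v] => d.insert k v
      | _ => d) d

def convertToPassport (data : List String) : List (List (String × String)) :=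
  let st := data.foldl
    (fun (st : List (PySem.Dict String String) × PySem.Dict String String) line =>
      if line == "" then (st.1 ++ [st.2], PySem.Dict.empty)
      else (st.1, cpAddLineA st.2 line)) ([], PySem.Dict.empty)
  (st.1 ++ [st.2]).map (·.items)

-- ===== PORT B =====
-- '[tok.split(":") for line in lines for tok in line.split(" ")]'
def cpTokenPairs (lines : List String) : List (List String) :=
  lines.flatMap (fun line =>
    ((PySem.Str.split? line " ").getD []).map (fun tok => (PySem.Str.split? tok ":").getD []))

-- 'for key, value in pairs: passport[key] = value' (a non-pair entry raises in Python; outside Pre_, skipped here)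
def cpParseGroup (lines : List String) : List (String × String) :=
  ((cpTokenPairs lines).foldl
    (fun d kv =>
      match kv with
      | [k, v] => d.insert k v
      | _ => d) PySem.Dict.empty).items

-- 'while "" in rest: i = rest.index(""); …' — index? is none exactly when "" ∉ rest
def cpLoopB (passports : List (List (String × String))) (rest : List String) :
    List (List (String × String)) :=
  match hi : PySem.List.index? rest "" with
  | some i => cpLoopB (passports ++ [cpParseGroup (rest.take i)]) (rest.drop (i + 1))
  | none => passports ++ [cpParseGroup rest]
termination_by rest.length
decreasing_by
  obtain ⟨hk, -, -⟩ := PySem.List.getElem_of_index?_eq_some hi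
  simp only [List.length_drop]; omega

def convertToPassport_alt (data : List String) : List (List (String × String)) :=
  cpLoopB [] data

-- ===== PRECONDITION & SPEC =====
-- Pre_ excludes exactly the inputs on which Python raises ValueError: a non-blank line containing a
-- space-separated token with a number of ':' other than one (the two-variable unpack then fails).
def Pre_convertToPassport (data : List String) : Prop :=
  ∀ line ∈ data, line ≠ "" →
    ∀ tok ∈ (PySem.Str.split? line " ").getD [], PySem.Str.count tok ":" = 1
instance (data : List String) : Decidable (Pre_convertToPassport data) := by
  unfold Pre_convertToPassport; infer_instance
def pvWitness_convertToPassport : List String := ["a:1 b:2", "", "c:3"]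

def Spec_convertToPassport (data : List String) (out : List (List (String × String))) : Prop := out = convertToPassport_alt data
instance (data : List String) (out : List (List (String × String))) : Decidable (Spec_convertToPassport data out) := by unfold Spec_convertToPassport; infer_instance

-- ===== CLAIM (what is proved, stated in full; the proofs are below) =====
def Claim_equal_convertToPassport : Prop := ∀ (data : List String), Dom_convertToPassport data → Pre_convertToPassport data → Spec_convertToPassport data (convertToPassport data)

-- ===== LEMMAS AND PROOFS =====

-- reference: the list of passport dicts produced from 'data' with 'cur' the dict under construction
def cpSplit (cur : PySem.Dict String String) : List String → List (PySem.Dict String String)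
  | [] => [cur]
  | l :: rest => if l == "" then cur :: cpSplit PySem.Dict.empty rest
                 else cpSplit (cpAddLineA cur l) rest

lemma cpA_loop (data : List String) :
    ∀ (ps : List (PySem.Dict String String)) (cur : PySem.Dict String String),
      (let st := data.foldl
        (fun (st : List (PySem.Dict String String) × PySem.Dict String String) line =>
          if line == "" then (st.1 ++ [st.2], PySem.Dict.empty)
          else (st.1, cpAddLineA st.2 line)) (ps, cur)
       st.1 ++ [st.2]) = ps ++ cpSplit cur data := by
  induction data with
  | nil => intro ps cur; simp [cpSplit]
  | cons l rest ih =>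
      intro ps cur
      by_cases h : l = ""
      · simpa [cpSplit, h] using ih (ps ++ [cur]) PySem.Dict.empty
      · simpa [cpSplit, h] using ih ps (cpAddLineA cur l)

lemma cpParseGroup_eq (lines : List String) :
    ∀ d, (cpTokenPairs lines).foldl
      (fun d kv =>
        match kv with
        | [k, v] => d.insert k v
        | _ => d) d = lines.foldl cpAddLineA d := by
  induction lines with
  | nil => intro d; simp [cpTokenPairs]
  | cons l rest ih =>
      intro d
      simp only [cpTokenPairs, List.flatMap_cons, List.foldl_cons, List.foldl_append, List.foldl_map] at *
      rw [ih]
      congr 1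
      simp only [cpAddLineA]
      apply PySem.List.foldl_congr_mem
      intro d' tok _
      cases h : PySem.Str.split? tok ":" with
      | none => rfl
      | some val => rcases val with (_ | ⟨a, (_ | ⟨b, (_ | ⟨c, t⟩)⟩)⟩) <;> rfl

lemma cpSplit_no_blank (pre : List String) (h : "" ∉ pre) (cur : PySem.Dict String String) :
    cpSplit cur pre = [pre.foldl cpAddLineA cur] := by
  induction pre generalizing cur with
  | nil => simp [cpSplit]
  | cons l rest ih =>
      simp only [List.mem_cons, not_or] at h
      simp [cpSplit, Ne.symm h.1, ih h.2]

lemma cpSplit_blank (pre suf : List String) (h : "" ∉ pre) (cur : PySem.Dict String String) :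
    cpSplit cur (pre ++ "" :: suf)
      = (pre.foldl cpAddLineA cur) :: cpSplit PySem.Dict.empty suf := by
  induction pre generalizing cur with
  | nil => simp [cpSplit]
  | cons l rest ih =>
      simp only [List.mem_cons, not_or] at h
      simp [cpSplit, Ne.symm h.1, ih h.2]

lemma cpLoopB_eq (n : Nat) :
    ∀ (rest : List String), rest.length ≤ n →
      ∀ ps, cpLoopB ps rest = ps ++ (cpSplit PySem.Dict.empty rest).map (·.items) := by
  induction n with
  | zero =>
      intro rest hlen ps
      have : rest = [] := List.length_eq_zero_iff.1 (Nat.le_zero.1 hlen)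
      subst this
      rw [cpLoopB]
      simp [cpSplit, cpParseGroup, cpParseGroup_eq]
  | succ n ih =>
      intro rest hlen ps
      rw [cpLoopB]
      split
      next i hi =>
          obtain ⟨pre, suf, hsplit, hplen, hpre⟩ := (PySem.List.index?_eq_some_iff _ _ _).1 hi
          have hi' : i < rest.length := by
            obtain ⟨hk, -, -⟩ := PySem.List.getElem_of_index?_eq_some hi
            exact hk
          rw [ih (rest.drop (i + 1)) (by simp; omega)]
          subst hsplit hplen
          rw [cpSplit_blank pre suf hpre]
          simp [cpParseGroup, cpParseGroup_eq]
      next hi =>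
          have hmem : "" ∉ rest := (PySem.List.index?_eq_none_iff _ _).1 hi
          rw [cpSplit_no_blank rest hmem]
          simp [cpParseGroup, cpParseGroup_eq]

-- ===== VERDICT (by name: the statement is the Claim_ definition above) =====
theorem convertToPassport_spec : Claim_equal_convertToPassport := by
  intro data _ _
  have hA := congrArg (List.map (fun d : PySem.Dict String String => d.items))
    (cpA_loop data [] PySem.Dict.empty)
  simp only [List.nil_append] at hA
  unfold Spec_convertToPassport convertToPassport convertToPassport_alt
  rw [cpLoopB_eq data.length data (le_refl _) []]
  simpa using hA
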